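-- pv_equiv track=rewrite | github.com/MaxProspero/permanence-os | scripts/telegram_control.py | _parse_x_watch_args
-- ===== SOURCE A (Python) =====
-- def _parse_x_watch_args(command_args: str) -> tuple[str, bool]:
--     handle = ""
--     include_replies = False
--     tokens = [token.strip() for token in str(command_args or "").split() if token.strip()]
--     for token in tokens:
--         lowered = token.lower()
--         if lowered in {"--include-replies", "replies=1", "include-replies=1", "include_replies=1"}:
--             include_replies = True
--             continue
--         if "=" in token:
--             key, value = token.split("=", 1)
--             key = key.strip().lower()
--             value = value.strip()
--             if key in {"handle", "user", "username", "account"} and (not handle):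
--                 handle = value
--                 continue
--         if not handle:
--             handle = token
--     return handle, include_replies
-- ===== SOURCE B (Python) =====
-- _FLAGS = {"--include-replies", "replies=1", "include-replies=1", "include_replies=1"}
-- _HANDLE_KEYS = {"handle", "user", "username", "account"}
--
--
-- def _extract_handle(token):
--     if "=" in token:
--         key, value = token.split("=", 1)
--         if key.strip().lower() in _HANDLE_KEYS:
--             return value.strip()
--     return token
--
--
-- def _parse_x_watch_args(command_args):
--     tokens = [t.strip() for t in str(command_args or "").split() if t.strip()]
--     include_replies = any(t.lower() in _FLAGS for t in tokens)
--     handles = (h for h in (_extract_handle(t) for t in tokens if t.lower() not in _FLAGS) if h)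
--     return next(handles, ""), include_replies
-- ===== Notes on version B (the rewrite author's own statement) =====
-- stated objective: idiomatic
-- what changed: Replaces the single stateful fold that threads (handle, include_replies) through branch/continue logic by two independent declarative passes: include_replies = any(flag), and handle = first truthy value of an extraction helper mapped over the non-flag tokens.
import Mathlib
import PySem

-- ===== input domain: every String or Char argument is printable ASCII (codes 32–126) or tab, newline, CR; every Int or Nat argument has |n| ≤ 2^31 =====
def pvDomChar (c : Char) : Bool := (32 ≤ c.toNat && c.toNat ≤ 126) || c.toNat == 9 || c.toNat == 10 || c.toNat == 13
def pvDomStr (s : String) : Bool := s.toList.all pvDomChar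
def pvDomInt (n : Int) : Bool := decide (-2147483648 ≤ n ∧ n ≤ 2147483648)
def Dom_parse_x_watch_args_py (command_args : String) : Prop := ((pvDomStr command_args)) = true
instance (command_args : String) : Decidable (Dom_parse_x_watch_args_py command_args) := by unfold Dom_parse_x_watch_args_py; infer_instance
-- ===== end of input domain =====

-- B replaces A's single stateful fold by two independent declarative passes (any-flag, then
-- first truthy extracted handle over the non-flag tokens): idiomatic, same cost.

-- ===== PORT A =====
-- A's per-token loop body, threading the state (handle, include_replies).
def pxAStep (st : String × Bool) (token : String) : String × Bool :=
  let handle := st.1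
  let include_replies := st.2
  let lowered := PySem.Str.lower token
  if lowered ∈ ["--include-replies", "replies=1", "include-replies=1", "include_replies=1"] then
    (handle, true)
  else if PySem.Str.isIn "=" token then
    match PySem.Str.splitMax? token "=" 1 with
    | some [key0, value0] =>
      let key := PySem.Str.lower (PySem.Str.strip key0)
      let value := PySem.Str.strip value0
      if (key ∈ ["handle", "user", "username", "account"]) ∧ handle = "" then
        (value, include_replies)
      else if handle = "" then (token, include_replies) else (handle, include_replies)
    | _ => (handle, include_replies)  -- unreachable: '=' in token yields exactly two pieces
  else if handle = "" then (token, include_replies) else (handle, include_replies)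

def parse_x_watch_args_py (command_args : String) : String × Bool :=
  -- str(command_args or "") is command_args itself for a str argument ("" or "" = "")
  let tokens := ((PySem.Str.split₀ command_args).filter
      (fun token => ¬ PySem.Str.strip token = "")).map (fun token => PySem.Str.strip token)
  tokens.foldl pxAStep ("", false)

-- ===== PORT B =====
def pvFlags : List String := ["--include-replies", "replies=1", "include-replies=1", "include_replies=1"]
def pvKeys : List String := ["handle", "user", "username", "account"]

def pvExtract (token : String) : String :=
  if PySem.Str.isIn "=" token then
    match PySem.Str.splitMax? token "=" 1 with
    | some [key, value] =>
      if PySem.Str.lower (PySem.Str.strip key) ∈ pvKeys then PySem.Str.strip value else token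
    | _ => ""  -- unreachable: '=' in token yields exactly two pieces
  else token

def parse_x_watch_args_py_alt (command_args : String) : String × Bool :=
  let tokens := ((PySem.Str.split₀ command_args).filter
      (fun t => ¬ PySem.Str.strip t = "")).map (fun t => PySem.Str.strip t)
  let includeReplies := tokens.any (fun t => PySem.Str.lower t ∈ pvFlags)
  let handle := (((tokens.filter (fun t => ¬ PySem.Str.lower t ∈ pvFlags)).map
      pvExtract).filter (fun h => ¬ h = "")).headD ""
  (handle, includeReplies)

-- ===== PRECONDITION & SPEC =====
def Spec_parse_x_watch_args_py (command_args : String) (out : String × Bool) : Prop := out = parse_x_watch_args_py_alt command_args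
instance (command_args : String) (out : String × Bool) : Decidable (Spec_parse_x_watch_args_py command_args out) := by unfold Spec_parse_x_watch_args_py; infer_instance

-- ===== CLAIM (what is proved, stated in full; the proofs are below) =====
def Claim_equal_parse_x_watch_args_py : Prop := ∀ (command_args : String), Dom_parse_x_watch_args_py command_args → Spec_parse_x_watch_args_py command_args (parse_x_watch_args_py command_args)

-- ===== LEMMAS AND PROOFS =====

def pvIsFlag (t : String) : Bool := PySem.Str.lower t ∈ pvFlags

def pvFirstHandle (ts : List String) : String :=
  (((ts.filter (fun t => ¬ PySem.Str.lower t ∈ pvFlags)).map pvExtract).filter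
      (fun h => ¬ h = "")).headD ""

-- A's step, characterised through B's helpers.
lemma pxAStep_eq (st : String × Bool) (t : String) :
    pxAStep st t =
      (if pvIsFlag t then (st.1, true)
       else if st.1 = "" then (pvExtract t, st.2) else st) := by
  rcases st with ⟨h, b⟩
  simp only [pxAStep, pvIsFlag, pvExtract, pvFlags, pvKeys]
  by_cases hf : PySem.Str.lower t ∈ (["--include-replies", "replies=1", "include-replies=1", "include_replies=1"] : List String)
  · simp [hf]
  · simp only [hf, if_false]
    by_cases he : PySem.Str.isIn "=" t = true
    · simp only [he, if_pos]
      rcases hs : PySem.Str.splitMax? t "=" 1 with _ | ⟨_ | ⟨k, _ | ⟨v, _ | _⟩⟩⟩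
      · by_cases hh : h = "" <;> simp [hh]
      · by_cases hh : h = "" <;> simp [hh]
      · by_cases hh : h = "" <;> simp [hh]
      · by_cases hh : h = "" <;>
          by_cases hk : PySem.Str.lower (PySem.Str.strip k) ∈ (["handle", "user", "username", "account"] : List String) <;>
          simp [hh, hk]
      · by_cases hh : h = "" <;> simp [hh]
    · simp only [he]
      by_cases hh : h = "" <;> simp [hh]

-- Loop invariant: A's fold computes B's two passes.
lemma foldl_pxAStep (ts : List String) (h : String) (b : Bool) :
    ts.foldl pxAStep (h, b) =
      ((if h = "" then pvFirstHandle ts else h),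
       (b || ts.any (fun t => PySem.Str.lower t ∈ pvFlags))) := by
  induction ts generalizing h b with
  | nil => by_cases hh : h = "" <;> simp [pvFirstHandle, hh]
  | cons t ts ih =>
    simp only [List.foldl_cons, pxAStep_eq]
    by_cases hf : pvIsFlag t
    · have hf' : (PySem.Str.lower t ∈ pvFlags) := by simpa [pvIsFlag] using hf
      by_cases hh : h = "" <;>
        simp [hf, ih, hh, pvFirstHandle, hf', List.any_cons] <;> tauto
    · have hf' : ¬ (PySem.Str.lower t ∈ pvFlags) := by simpa [pvIsFlag] using hf
      by_cases hh : h = ""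
      · by_cases hx : pvExtract t = ""
        · simp [hf, hh, ih, pvFirstHandle, hf', hx, List.any_cons]
        · simp [hf, hh, ih, pvFirstHandle, hf', hx, List.any_cons]
      · simp [hf, hh, ih, hf', List.any_cons]

-- ===== VERDICT (by name: the statement is the Claim_ definition above) =====
theorem parse_x_watch_args_py_spec : Claim_equal_parse_x_watch_args_py := by
  intro command_args _
  show _ = _
  simp [parse_x_watch_args_py, parse_x_watch_args_py_alt, foldl_pxAStep, pvFirstHandle]
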